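-- pv_equiv track=rewrite | github.com/atgugu/ARC_explorations | Cognitive_Workspace/src/dsl/core_primitives.py | hollow
-- ===== SOURCE A (Python) =====
-- from typing import List, Tuple, Union, Optional
--
-- Object = List[Tuple[int, int]]
--
-- def hollow(object: Object) -> Object:
--     """
--     Keep only the outline of an object (remove interior).
--
--     Args:
--         object: Object to hollow
--
--     Returns:
--         Object with only boundary pixels
--     """
--     if not object:
--         return []
--
--     object_set = set(object)
--     boundary = []
--
--     # A pixel is on boundary if it has at least one non-object neighbor
--     for r, c in object:
--         is_boundary = False
--         for dr, dc in [(-1, 0), (1, 0), (0, -1), (0, 1)]: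
--             nr, nc = r + dr, c + dc
--             if (nr, nc) not in object_set:
--                 is_boundary = True
--                 break
--
--         if is_boundary:
--             boundary.append((r, c))
--
--     return boundary
-- ===== SOURCE B (Python) =====
-- from typing import List, Tuple
--
-- Object = List[Tuple[int, int]]
--
-- def hollow(object: Object) -> Object:
--     """Keep only boundary pixels: set-shift formulation."""
--     s = set(object)
--     down  = {(r + 1, c) for (r, c) in s}   # pixels whose up-neighbor is in s
--     up    = {(r - 1, c) for (r, c) in s}   # pixels whose down-neighbor is in s
--     right = {(r, c + 1) for (r, c) in s}   # pixels whose left-neighbor is in s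
--     left  = {(r, c - 1) for (r, c) in s}   # pixels whose right-neighbor is in s
--     interior = s & down & up & right & left
--     return [p for p in object if p not in interior]
-- ===== Notes on version B (the rewrite author's own statement) =====
-- stated objective: alternative
-- what changed: Replaces the per-pixel four-direction neighbor-probing inner loop with whole-set translations (four shifted copies of the pixel set) intersected with the set to form the interior, then a single filtering pass over the original list.
import Mathlib
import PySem

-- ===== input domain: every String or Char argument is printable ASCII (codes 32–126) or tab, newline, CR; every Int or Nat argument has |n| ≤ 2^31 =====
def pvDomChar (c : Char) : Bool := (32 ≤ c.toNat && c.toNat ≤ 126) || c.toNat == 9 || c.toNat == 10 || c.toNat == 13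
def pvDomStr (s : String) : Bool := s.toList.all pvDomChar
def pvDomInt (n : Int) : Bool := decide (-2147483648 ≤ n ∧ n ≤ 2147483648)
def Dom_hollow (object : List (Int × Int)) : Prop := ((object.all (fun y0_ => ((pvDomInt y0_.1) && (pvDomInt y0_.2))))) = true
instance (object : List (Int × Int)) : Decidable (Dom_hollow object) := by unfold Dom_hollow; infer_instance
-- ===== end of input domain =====

-- B replaces the per-pixel neighbor probing by four whole-set translations intersected into an interior set, then one filter pass; same cost, different decomposition.

-- ===== PORT A =====
def hollow (object : List (Int × Int)) : List (Int × Int) :=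
  if object = [] then []
  else
    let objectSet : PySem.Set (Int × Int) := PySem.Set.ofList object
    object.foldl (fun boundary p =>
      -- inner loop with break = any over the four offsets
      let isBoundary := [((-1 : Int), (0 : Int)), (1, 0), (0, -1), (0, 1)].any
        (fun d => !(PySem.Set.contains objectSet (p.1 + d.1, p.2 + d.2)))
      if isBoundary then boundary ++ [p] else boundary) []

-- ===== PORT B =====
def hollow_alt (object : List (Int × Int)) : List (Int × Int) :=
  let s : PySem.Set (Int × Int) := PySem.Set.ofList object
  let down  : PySem.Set (Int × Int) := PySem.Set.ofList (s.map (fun p => (p.1 + 1, p.2)))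
  let up    : PySem.Set (Int × Int) := PySem.Set.ofList (s.map (fun p => (p.1 - 1, p.2)))
  let right : PySem.Set (Int × Int) := PySem.Set.ofList (s.map (fun p => (p.1, p.2 + 1)))
  let left  : PySem.Set (Int × Int) := PySem.Set.ofList (s.map (fun p => (p.1, p.2 - 1)))
  let interior := PySem.Set.inter (PySem.Set.inter (PySem.Set.inter (PySem.Set.inter s down) up) right) left
  object.filter (fun p => !(PySem.Set.contains interior p))

-- ===== PRECONDITION & SPEC =====
def Spec_hollow (object : List (Int × Int)) (out : List (Int × Int)) : Prop := out = hollow_alt object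
instance (object : List (Int × Int)) (out : List (Int × Int)) : Decidable (Spec_hollow object out) := by unfold Spec_hollow; infer_instance

-- ===== CLAIM (what is proved, stated in full; the proofs are below) =====
def Claim_equal_hollow : Prop := ∀ (object : List (Int × Int)), Dom_hollow object → Spec_hollow object (hollow object)

-- ===== LEMMAS AND PROOFS =====

-- membership in a shifted copy of the set = the unshifted point is in the set
theorem mem_shift (s : List (Int × Int)) (a b : Int) (p : Int × Int) :
    p ∈ PySem.Set.ofList (s.map (fun q => (q.1 + a, q.2 + b))) ↔ (p.1 - a, p.2 - b) ∈ s := by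
  rw [PySem.Set.mem_ofList, List.mem_map]
  constructor
  · rintro ⟨q, hq, hfq⟩
    subst hfq
    simpa using hq
  · intro h
    refine ⟨(p.1 - a, p.2 - b), h, ?_⟩
    simp

theorem pred_eq (object : List (Int × Int)) (p : Int × Int) (hp : p ∈ object) :
    ([((-1 : Int), (0 : Int)), (1, 0), (0, -1), (0, 1)].any
        (fun d => !(PySem.Set.contains (PySem.Set.ofList object) (p.1 + d.1, p.2 + d.2))))
      = !(PySem.Set.contains
          (PySem.Set.inter (PySem.Set.inter (PySem.Set.inter
            (PySem.Set.inter (PySem.Set.ofList object)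
              (PySem.Set.ofList ((PySem.Set.ofList object).map (fun q => (q.1 + 1, q.2)))))
            (PySem.Set.ofList ((PySem.Set.ofList object).map (fun q => (q.1 - 1, q.2)))))
            (PySem.Set.ofList ((PySem.Set.ofList object).map (fun q => (q.1, q.2 + 1)))))
            (PySem.Set.ofList ((PySem.Set.ofList object).map (fun q => (q.1, q.2 - 1))))) p) := by
  rw [Bool.eq_iff_iff]
  simp only [List.any_cons, List.any_nil, Bool.or_false, Bool.or_eq_true, Bool.not_eq_true',
    ← Bool.not_eq_true, PySem.Set.contains_iff, PySem.Set.mem_inter]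
  rw [show (fun q : Int × Int => (q.1 + 1, q.2)) = (fun q : Int × Int => (q.1 + 1, q.2 + 0)) from
        funext (by intro q; simp),
      show (fun q : Int × Int => (q.1 - 1, q.2)) = (fun q : Int × Int => (q.1 + (-1), q.2 + 0)) from
        funext (by intro q; simp [sub_eq_add_neg]),
      show (fun q : Int × Int => (q.1, q.2 + 1)) = (fun q : Int × Int => (q.1 + 0, q.2 + 1)) from
        funext (by intro q; simp),
      show (fun q : Int × Int => (q.1, q.2 - 1)) = (fun q : Int × Int => (q.1 + 0, q.2 + (-1))) from
        funext (by intro q; simp [sub_eq_add_neg]),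
      mem_shift, mem_shift, mem_shift, mem_shift, PySem.Set.mem_ofList,
      PySem.Set.mem_ofList, PySem.Set.mem_ofList, PySem.Set.mem_ofList, PySem.Set.mem_ofList]
  simp only [sub_zero, sub_neg_eq_add,
    show p.1 + -1 = p.1 - 1 from by ring, show p.2 + -1 = p.2 - 1 from by ring,
    show p.1 + 0 = p.1 from by ring, show p.2 + 0 = p.2 from by ring]
  simp only [PySem.Set.mem_ofList]
  tauto

-- ===== VERDICT (by name: the statement is the Claim_ definition above) =====
theorem hollow_spec : Claim_equal_hollow := by
  intro object _
  show hollow object = hollow_alt object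
  unfold hollow hollow_alt
  by_cases h : object = []
  · subst h; simp
  · simp only [h]
    rw [PySem.List.foldl_append_if_eq_filter]
    simp only [List.nil_append]
    exact List.filter_congr (fun p hp => pred_eq object p hp)
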